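-- pv_equiv track=rewrite | github.com/taako2/the-fuck-pile | club_functions.py | recommend_clubs
-- ===== SOURCE A (Python) =====
-- def recommend_clubs(P2F, P2C, person):
--     """Return a list of club recommendations for person based on the
--     "person to friends" dictionary person_to_friends and the "person
--     to clubs" dictionary person_to_clubs using the specified
--     recommendation system.
--
--     >>> recommend_clubs(P2F, P2C, 'Stephanie J Tanner')
--     [('Comet Club', 1), ('Rock N Rollers', 1), ('Smash Club', 1)]
--     """
--
--     if person not in P2F and person not in P2C:
--         return []
--     club_count = {}
--     if person in P2C:
--         for club in P2C[person]:
--             club_count[club] = 1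
--     for friend in P2F.get(person, []):
--         if friend in P2C:
--             for club in P2C[friend]:
--                 if club not in club_count:
--                     club_count[club] = 0
--                 club_count[club] += 1
--     return [(club, count) for club, count in club_count.items()]
-- ===== SOURCE B (Python) =====
-- def recommend_clubs(P2F, P2C, person):
--     # Build one tagged stream: own clubs tagged True, friends' clubs tagged False.
--     stream = [(c, True) for c in P2C.get(person, [])]
--     for f in P2F.get(person, []):
--         for c in P2C.get(f, []):
--             stream.append((c, False))
--     # Extract-and-remove: take the first club, tally all its occurrences
--     # (own tags contribute 1 at most once, each friend occurrence 1),
--     # drop them from the stream, and recurse on the remainder.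
--     out = []
--     while stream:
--         club = stream[0][0]
--         seen_own = False
--         friends = 0
--         rest = []
--         for c, is_own in stream:
--             if c == club:
--                 if is_own:
--                     seen_own = True
--                 else:
--                     friends += 1
--             else:
--                 rest.append((c, is_own))
--         out.append((club, friends + (1 if seen_own else 0)))
--         stream = rest
--     return out
-- ===== Notes on version B (the rewrite author's own statement) =====
-- stated objective: alternative
-- what changed: Replaces A's dict counting (seed-to-1, conditional-init, increment) with an extract-and-remove recursion over one tagged club stream: repeatedly take the first remaining club, tally all its occurrences in a single pass while deleting them, and recurse on the shrunken remainder; no dictionary is used.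
import Mathlib
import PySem

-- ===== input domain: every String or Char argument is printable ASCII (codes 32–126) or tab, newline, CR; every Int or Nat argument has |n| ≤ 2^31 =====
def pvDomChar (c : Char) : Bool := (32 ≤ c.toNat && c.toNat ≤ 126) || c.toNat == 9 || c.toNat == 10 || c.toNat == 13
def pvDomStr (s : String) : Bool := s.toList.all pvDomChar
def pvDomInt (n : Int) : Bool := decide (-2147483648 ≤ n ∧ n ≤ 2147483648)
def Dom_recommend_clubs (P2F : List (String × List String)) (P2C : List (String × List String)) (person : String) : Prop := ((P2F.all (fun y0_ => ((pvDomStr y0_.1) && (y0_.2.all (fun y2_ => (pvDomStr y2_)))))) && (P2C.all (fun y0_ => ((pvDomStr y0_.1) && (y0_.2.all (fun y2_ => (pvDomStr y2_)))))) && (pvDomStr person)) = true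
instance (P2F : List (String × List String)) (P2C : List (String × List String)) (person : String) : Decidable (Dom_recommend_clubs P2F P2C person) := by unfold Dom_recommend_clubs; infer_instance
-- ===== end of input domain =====

-- B replaces A's dict counting with an extract-and-remove recursion over one tagged club
-- stream (take the first club, tally and delete all its occurrences, recurse on the rest);
-- objective: alternative (no dict at all; not faster).

-- ===== PORT A =====
def recommend_clubs (P2F : List (String × List String)) (P2C : List (String × List String)) (person : String) : List (String × Int) :=
  let dF := PySem.Dict.ofList P2F
  let dC := PySem.Dict.ofList P2C
  if !dF.contains person && !dC.contains person then []
  else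
    let club_count : PySem.Dict String Int :=
      if dC.contains person then
        (dC.getD person []).foldl (fun cc club => cc.insert club 1) PySem.Dict.empty
      else PySem.Dict.empty
    let club_count :=
      (dF.getD person []).foldl (fun cc friend =>
        if dC.contains friend then
          (dC.getD friend []).foldl (fun cc club =>
            let cc := if cc.contains club then cc else cc.insert club 0
            cc.insert club (cc.getD club 0 + 1)) cc
        else cc) club_count
    club_count.items

-- ===== PORT B =====
-- body of B's inner for-loop over the stream: accumulator (seen_own, friends, rest)
def pvStep (club : String) (acc : Bool × Int × List (String × Bool)) (p : String × Bool) :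
    Bool × Int × List (String × Bool) :=
  if p.1 == club then
    if p.2 then (true, acc.2.1, acc.2.2) else (acc.1, acc.2.1 + 1, acc.2.2)
  else (acc.1, acc.2.1, acc.2.2 ++ [p])

-- B's inner for-loop: one pass tallying `club` and collecting the remainder
def pvTally (stream : List (String × Bool)) (club : String) : Bool × Int × List (String × Bool) :=
  stream.foldl (pvStep club) (false, 0, [])

lemma pvTally_foldl (club : String) (s : List (String × Bool)) (acc : Bool × Int × List (String × Bool)) :
    s.foldl (pvStep club) acc =
      (acc.1 || s.any (fun q => q.1 == club && q.2),
       acc.2.1 + ((s.filter (fun q => q.1 == club && !q.2)).length : Int),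
       acc.2.2 ++ s.filter (fun q => !(q.1 == club))) := by
  induction s generalizing acc with
  | nil => simp
  | cons p t ih =>
    simp only [List.foldl_cons, ih, pvStep, List.any_cons, List.filter_cons]
    by_cases h1 : (p.1 == club) = true
    · by_cases h2 : p.2 = true <;> simp [h1, h2] <;> push_cast <;> ring_nf
    · simp only [Bool.not_eq_true] at h1
      simp [h1]

lemma pvTally_spec (stream : List (String × Bool)) (club : String) :
    pvTally stream club =
      (stream.any (fun q => q.1 == club && q.2),
       ((stream.filter (fun q => q.1 == club && !q.2)).length : Int),
       stream.filter (fun q => !(q.1 == club))) := by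
  simpa using pvTally_foldl club stream (false, 0, [])

-- B's while-loop: extract the first club with its tally, recurse on the remainder
def pvExtract : List (String × Bool) → List (String × Int)
  | [] => []
  | p :: t =>
    let r := pvTally (p :: t) p.1
    (p.1, r.2.1 + (if r.1 then 1 else 0)) :: pvExtract r.2.2
termination_by s => s.length
decreasing_by
  simp only [pvTally_spec, List.filter_cons, beq_self_eq_true, Bool.not_true,
    Bool.false_eq_true, if_false, List.length_cons]
  have := List.length_filter_le (fun q : String × Bool => !(q.1 == p.1)) t
  omega

def recommend_clubs_alt (P2F : List (String × List String)) (P2C : List (String × List String)) (person : String) : List (String × Int) :=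
  let dF := PySem.Dict.ofList P2F
  let dC := PySem.Dict.ofList P2C
  let stream := (dC.getD person []).map (fun c => (c, true))
  let stream := (dF.getD person []).foldl
    (fun st f => st ++ (dC.getD f []).map (fun c => (c, false))) stream
  pvExtract stream

-- ===== PRECONDITION & SPEC =====
def Spec_recommend_clubs (P2F : List (String × List String)) (P2C : List (String × List String)) (person : String) (out : List (String × Int)) : Prop := out = recommend_clubs_alt P2F P2C person
instance (P2F : List (String × List String)) (P2C : List (String × List String)) (person : String) (out : List (String × Int)) : Decidable (Spec_recommend_clubs P2F P2C person out) := by unfold Spec_recommend_clubs; infer_instance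

-- ===== CLAIM (what is proved, stated in full; the proofs are below) =====
def Claim_equal_recommend_clubs : Prop := ∀ (P2F : List (String × List String)) (P2C : List (String × List String)) (person : String), Dom_recommend_clubs P2F P2C person → Spec_recommend_clubs P2F P2C person (recommend_clubs P2F P2C person)

-- ===== LEMMAS AND PROOFS =====

-- seeding every club of l with value 1: lookup afterwards
lemma seedOne_getD (l : List String) (d : PySem.Dict String Int) (x : String) :
    (l.foldl (fun cc club => cc.insert club 1) d).getD x 0 = if x ∈ l then 1 else d.getD x 0 := by
  induction l generalizing d with
  | nil => simp
  | cons c t ih =>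
    simp only [List.foldl_cons, ih, PySem.Dict.getD_insert, List.mem_cons]
    by_cases hx : x ∈ t <;> by_cases hc : x = c <;> simp [hx, hc]

-- A's conditional-init + increment step is a single insert of (old value + 1)
lemma step_eq (cc : PySem.Dict String Int) (club : String) :
    (let cc' := if cc.contains club then cc else cc.insert club 0
     cc'.insert club (cc'.getD club 0 + 1)) = cc.insert club (cc.getD club 0 + 1) := by
  by_cases h : cc.contains club = true
  · simp [h]
  · have h' : cc.contains club = false := by simpa using h
    simp only [h', Bool.false_eq_true, if_false]
    rw [PySem.Dict.insert_insert_self, PySem.Dict.getD_insert_self]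
    simp [PySem.Dict.getD_of_not_contains, h']

-- nested friend/club loop = one fold over the flattened club stream
lemma foldl_flatMap' {α β γ : Type} (l : List α) (g : α → List β)
    (step : γ → β → γ) (init : γ) :
    l.foldl (fun d f => (g f).foldl step d) init = (l.flatMap g).foldl step init := by
  induction l generalizing init with
  | nil => rfl
  | cons a t ih => simp [List.flatMap_cons, List.foldl_append, ih]

-- the accumulate-by-append loop is init ++ flatten
lemma foldl_append_flat {α β : Type} (l : List α) (g : α → List β) (init : List β) :
    l.foldl (fun st f => st ++ g f) init = init ++ l.flatMap g := by
  induction l generalizing init with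
  | nil => simp
  | cons a t ih => simp [List.flatMap_cons, ih]

-- A's result, characterised: counts over the deduplicated combined club stream
lemma recommend_clubs_char (P2F P2C : List (String × List String)) (person : String) :
    recommend_clubs P2F P2C person =
      (PySem.Set.ofList (((PySem.Dict.ofList P2C).getD person []) ++
          (((PySem.Dict.ofList P2F).getD person []).flatMap (fun f => (PySem.Dict.ofList P2C).getD f [])))).map
        (fun c => (c,
          (if c ∈ (PySem.Dict.ofList P2C).getD person [] then (1 : Int) else 0) +
          ((((PySem.Dict.ofList P2F).getD person []).flatMap (fun f => (PySem.Dict.ofList P2C).getD f [])).count c : Int))) := by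
  unfold recommend_clubs
  dsimp only []
  by_cases hg : (!(PySem.Dict.ofList P2F).contains person && !(PySem.Dict.ofList P2C).contains person) = true
  · have h1 : (PySem.Dict.ofList P2F).contains person = false := by
      revert hg; cases (PySem.Dict.ofList P2F).contains person <;> simp
    have h2 : (PySem.Dict.ofList P2C).contains person = false := by
      revert hg; cases (PySem.Dict.ofList P2C).contains person <;> simp
    rw [if_pos hg, PySem.Dict.getD_of_not_contains _ _ h1, PySem.Dict.getD_of_not_contains _ _ h2]
    simp
  · rw [if_neg hg]
    have hcc0 : (if (PySem.Dict.ofList P2C).contains person then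
          ((PySem.Dict.ofList P2C).getD person []).foldl (fun cc club => cc.insert club 1)
            (PySem.Dict.empty : PySem.Dict String Int)
        else PySem.Dict.empty)
        = ((PySem.Dict.ofList P2C).getD person []).foldl (fun cc club => cc.insert club 1)
            (PySem.Dict.empty : PySem.Dict String Int) := by
      by_cases h : (PySem.Dict.ofList P2C).contains person = true
      · rw [if_pos h]
      · rw [if_neg h, PySem.Dict.getD_of_not_contains _ _ (by simpa using h)]
        rfl
    rw [hcc0]
    have hs : (fun (cc : PySem.Dict String Int) (club : String) =>
          let cc := if cc.contains club then cc else cc.insert club 0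
          cc.insert club (cc.getD club 0 + 1))
        = fun cc club => cc.insert club (cc.getD club 0 + 1) := by
      funext cc club; exact step_eq cc club
    simp only [hs]
    have hfr : ∀ (cc : PySem.Dict String Int) (f : String),
        (if (PySem.Dict.ofList P2C).contains f then
            ((PySem.Dict.ofList P2C).getD f []).foldl (fun cc club => cc.insert club (cc.getD club 0 + 1)) cc
          else cc)
        = ((PySem.Dict.ofList P2C).getD f []).foldl (fun cc club => cc.insert club (cc.getD club 0 + 1)) cc := by
      intro cc f
      by_cases h : (PySem.Dict.ofList P2C).contains f = true
      · rw [if_pos h]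
      · rw [if_neg h, PySem.Dict.getD_of_not_contains _ _ (by simpa using h)]
        rfl
    simp only [hfr]
    rw [foldl_flatMap']
    set dC := PySem.Dict.ofList P2C with hdC
    set ownRaw := dC.getD person [] with hor
    set fc := ((PySem.Dict.ofList P2F).getD person []).flatMap (fun f => dC.getD f []) with hfc
    set cc0 := ownRaw.foldl (fun cc club => cc.insert club 1) (PySem.Dict.empty : PySem.Dict String Int) with hcc0d
    set D := fc.foldl (fun cc club => cc.insert club (cc.getD club 0 + 1)) cc0 with hD
    have hnd0 : cc0.keys.Nodup := by
      rw [hcc0d]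
      exact PySem.Dict.nodup_keys_foldl_insert ownRaw (fun _ _ => 1) PySem.Dict.empty PySem.Dict.nodup_keys_empty
    have hnd : D.keys.Nodup := by
      rw [hD]
      exact PySem.Dict.nodup_keys_foldl_insert fc (fun d x => d.getD x 0 + 1) cc0 hnd0
    rw [PySem.Dict.items_eq_map_keys D hnd 0]
    have hk0 : cc0.keys = PySem.Set.ofList ownRaw := by
      rw [hcc0d, PySem.Dict.keys_foldl_insert ownRaw (fun _ _ => 1) PySem.Dict.empty,
          PySem.Dict.keys_empty, PySem.Set.ofList_eq_foldl]
      rfl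
    have hkeys : D.keys = PySem.Set.ofList (ownRaw ++ fc) := by
      rw [hD, PySem.Dict.keys_foldl_insert fc (fun d x => d.getD x 0 + 1) cc0, hk0,
          PySem.Set.ofList_append]
    rw [hkeys]
    apply List.map_congr_left
    intro c _
    have hval : D.getD c 0 = (if c ∈ ownRaw then (1 : Int) else 0) + (fc.count c : Int) := by
      rw [hD, PySem.Dict.getD_foldl_insert_add_one, hcc0d, seedOne_getD]
      simp
    rw [hval]

-- filtering the extracted club away does not change another club's tally
lemma filter_rest {P : String × Bool → Bool} (s : List (String × Bool)) (x c : String)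
    (hc : c ≠ x) (hP : ∀ q, P q = true → q.1 = c) :
    (s.filter (fun q => !(q.1 == x))).filter P = s.filter P := by
  induction s with
  | nil => rfl
  | cons p t ih =>
    by_cases h : P p = true
    · have h1 : p.1 = c := hP p h
      have h2 : (!(p.1 == x)) = true := by simp [h1, hc]
      simp [List.filter_cons, h, h2, ih]
    · have h' : P p = false := by simpa using h
      by_cases h2 : (!(p.1 == x)) = true
      · simp [List.filter_cons, h2, h', ih]
      · simp only [Bool.not_eq_true'] at h2 ⊢
        simp [List.filter_cons, h2, h', ih]

lemma any_rest (s : List (String × Bool)) (x c : String) (hc : c ≠ x) :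
    (s.filter (fun q => !(q.1 == x))).any (fun q => q.1 == c && q.2)
      = s.any (fun q => q.1 == c && q.2) := by
  induction s with
  | nil => rfl
  | cons p t ih =>
    by_cases h : (p.1 == x) = true
    · have hx : p.1 = x := by simpa using h
      have h1 : (p.1 == c) = false := by
        rw [hx]; exact beq_eq_false_iff_ne.mpr (Ne.symm hc)
      simp [List.filter_cons, h, h1, ih]
    · have h' : (p.1 == x) = false := by simpa using h
      simp [List.filter_cons, h', ih]

-- map fst commutes with filtering on fst
lemma map_fst_filter (s : List (String × Bool)) (x : String) :
    (s.filter (fun q => !(q.1 == x))).map Prod.fst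
      = (s.map Prod.fst).filter (fun y => !(y == x)) := by
  induction s with
  | nil => rfl
  | cons p t ih =>
    by_cases h : (p.1 == x) = true <;> simp [List.filter_cons, h, ih]

-- PySem.Set.discard is a filter
lemma discard_eq_filter (s : List String) (x : String) :
    PySem.Set.discard s x = s.filter (fun y => !(y == x)) := by
  simp [PySem.Set.discard]

-- ordered dedup commutes with filtering
lemma ofList_filter (p : String -> Bool) (l : List String) :
    PySem.Set.ofList (l.filter p) = (PySem.Set.ofList l).filter p := by
  induction l with
  | nil => rfl
  | cons a t ih =>
    by_cases h : p a = true
    · simp only [List.filter_cons, h, if_true, PySem.Set.ofList_cons, discard_eq_filter, ih,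
        List.filter_filter]
      congr 1
      apply List.filter_congr
      intro y _
      by_cases hy : (y == a) = true <;> simp [hy]
    · have h' : p a = false := by simpa using h
      simp only [List.filter_cons, h', Bool.false_eq_true, if_false, PySem.Set.ofList_cons,
        discard_eq_filter, ih, List.filter_filter]
      apply List.filter_congr
      intro y _
      by_cases hy : (y == a) = true
      · have : y = a := by simpa using hy
        simp [hy, this, h']
      · simp [hy]

-- ordered dedup steps by removing the head's duplicates
lemma ofList_filter_ne (l : List String) (x : String) :
    PySem.Set.discard (PySem.Set.ofList l) x = PySem.Set.ofList (l.filter (fun y => !(y == x))) := by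
  rw [discard_eq_filter, ofList_filter]

lemma pvExtract_eq_aux (n : Nat) : ∀ (s : List (String × Bool)), s.length ≤ n →
    pvExtract s = (PySem.Set.ofList (s.map Prod.fst)).map
      (fun c => (c, ((s.filter (fun q => q.1 == c && !q.2)).length : Int)
                    + (if s.any (fun q => q.1 == c && q.2) then 1 else 0))) := by
  induction n with
  | zero =>
    intro s hs
    have : s = [] := List.eq_nil_of_length_eq_zero (Nat.le_zero.mp hs)
    subst this
    simp [pvExtract]
  | succ n ih =>
    intro s hs
    match s with
    | [] => simp [pvExtract]
    | p :: t =>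
      rw [pvExtract]
      simp only [pvTally_spec]
      have hrest : ((p :: t).filter (fun q => !(q.1 == p.1))).length ≤ n := by
        simp only [List.filter_cons, beq_self_eq_true, Bool.not_true, Bool.false_eq_true, if_false]
        have := List.length_filter_le (fun q : String × Bool => !(q.1 == p.1)) t
        simp only [List.length_cons] at hs
        omega
      rw [ih _ hrest]
      simp only [List.map_cons, PySem.Set.ofList_cons]
      congr 1
      rw [map_fst_filter]
      have hh : (List.map Prod.fst (p :: t)).filter (fun y => !(y == p.1))
          = (List.map Prod.fst t).filter (fun y => !(y == p.1)) := by
        simp [List.filter_cons]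
      rw [hh, ofList_filter_ne]
      apply List.map_congr_left
      intro c hcmem
      have hc : c ≠ p.1 := by
        have hm := (PySem.Set.mem_ofList _ _).mp hcmem
        have := (List.mem_filter.mp hm).2
        simpa using this
      rw [filter_rest (p :: t) p.1 c hc (by intro q hq; simpa using (Bool.and_elim_left hq)),
          any_rest (p :: t) p.1 c hc]

-- B's extract-and-remove loop = tallies over the deduplicated club stream
lemma pvExtract_eq (s : List (String × Bool)) :
    pvExtract s = (PySem.Set.ofList (s.map Prod.fst)).map
      (fun c => (c, ((s.filter (fun q => q.1 == c && !q.2)).length : Int)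
                    + (if s.any (fun q => q.1 == c && q.2) then 1 else 0))) :=
  pvExtract_eq_aux s.length s (Nat.le_refl _)

-- ===== VERDICT (by name: the statement is the Claim_ definition above) =====
theorem recommend_clubs_spec : Claim_equal_recommend_clubs := by
  intro P2F P2C person _
  unfold Spec_recommend_clubs
  rw [recommend_clubs_char]
  unfold recommend_clubs_alt
  dsimp only []
  rw [foldl_append_flat, pvExtract_eq]
  set dC := PySem.Dict.ofList P2C
  set own := dC.getD person [] with hown
  set fc := ((PySem.Dict.ofList P2F).getD person []).flatMap (fun f => dC.getD f []) with hfc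
  have hstream : (own.map (fun c => (c, true)) ++
      ((PySem.Dict.ofList P2F).getD person []).flatMap (fun f => (dC.getD f []).map (fun c => (c, false))))
      = own.map (fun c => (c, true)) ++ fc.map (fun c => (c, false)) := by
    rw [hfc, List.map_flatMap]
  rw [hstream]
  have hmapfst : ∀ (b : Bool) (l : List String), (l.map (fun c => (c, b))).map Prod.fst = l := by
    intro b l
    induction l with
    | nil => rfl
    | cons a t ih => simp [ih]
  have hfst : (own.map (fun c => (c, true)) ++ fc.map (fun c => (c, false))).map Prod.fst = own ++ fc := by
    rw [List.map_append, hmapfst, hmapfst]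
  rw [hfst]
  apply List.map_congr_left
  intro c _
  have hfilter : ((own.map (fun c => (c, true)) ++ fc.map (fun c => (c, false))).filter
      (fun q => q.1 == c && !q.2)).length = fc.count c := by
    simp [List.filter_append, List.filter_map, Function.comp_def, List.count_eq_countP,
      List.countP_eq_length_filter]
  have hany : (own.map (fun c => (c, true)) ++ fc.map (fun c => (c, false))).any
      (fun q => q.1 == c && q.2) = decide (c ∈ own) := by
    simp [List.any_append, List.any_map, Function.comp_def, List.any_beq']
  rw [hfilter, hany]
  by_cases hc : c ∈ own <;> simp [hc] <;> ring
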